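-- pv_equiv track=rewrite | github.com/rubygitflow/leetcode_python | binary_vector.py | allOne
-- ===== SOURCE A (Python) =====
-- def allOne(binary_list):
--     output = {}
--     left = 0
--     length = 0
--     for i, n in enumerate(binary_list):
--         if n == 1:
--             if length == 0:
--                 left = i
--                 output[left] = 1
--             else:
--                 output[left] += 1
--             length = output[left]
--         else:
--             length = 0
--     return output
-- ===== SOURCE B (Python) =====
-- def allOne(binary_list):
--     # run-scanning: find each maximal run of 1s and emit one entry per run
--     output = {}
--     i = 0
--     n = len(binary_list)
--     while i < n:
--         if binary_list[i] != 1: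
--             i += 1
--         else:
--             j = i + 1
--             while j < n and binary_list[j] == 1:
--                 j += 1
--             output[i] = j - i
--             i = j
--     return output
-- ===== Notes on version B (the rewrite author's own statement) =====
-- stated objective: alternative
-- what changed: B replaces A's per-element dict accumulator (insert/increment on every 1) with a run-scanning pass that locates each maximal run of 1s and emits one dict entry per run.
import Mathlib
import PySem

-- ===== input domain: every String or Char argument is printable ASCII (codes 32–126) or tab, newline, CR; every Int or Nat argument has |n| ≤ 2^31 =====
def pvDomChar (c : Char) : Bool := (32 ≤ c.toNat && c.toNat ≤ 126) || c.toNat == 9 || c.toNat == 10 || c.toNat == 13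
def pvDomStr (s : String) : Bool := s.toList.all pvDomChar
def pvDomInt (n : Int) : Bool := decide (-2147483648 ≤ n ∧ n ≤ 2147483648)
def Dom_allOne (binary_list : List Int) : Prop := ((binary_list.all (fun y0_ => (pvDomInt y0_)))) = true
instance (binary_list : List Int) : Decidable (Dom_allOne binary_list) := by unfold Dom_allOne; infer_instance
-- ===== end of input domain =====

-- B replaces A's per-element dict accumulator with a run-scanning pass emitting one entry per maximal run of 1s (alternative decomposition, same O(n) cost).

-- ===== PORT A =====
-- state: (output dict, left, length).  'output[left] += 1; length = output[left]' is ported with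
-- modify/getD with default 0; the default is never reached since left is a key whenever length ≠ 0.
def stepA (st : PySem.Dict Int Int × Int × Int) (p : Int × Int) : PySem.Dict Int Int × Int × Int :=
  let output := st.1
  let left := st.2.1
  let length := st.2.2
  let i := p.1
  let n := p.2
  if n = 1 then
    if length = 0 then
      let left := i
      let output := output.insert left 1
      (output, left, output.getD left 0)
    else
      let output := output.modify left 0 (· + 1)
      (output, left, output.getD left 0)
  else (output, left, 0)

def allOne (binary_list : List Int) : List (Int × Int) :=
  ((PySem.List.enumerate binary_list 0).foldl stepA (PySem.Dict.empty, 0, 0)).1.items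

-- ===== PORT B =====
-- length of the maximal leading run of 1s (Source B's inner while loop)
def runLen : List Int → Nat
  | [] => 0
  | x :: xs => if x = 1 then runLen xs + 1 else 0

-- Source B's outer while loop: skip non-1s, measure a run, jump past it
def altGo : List Int → Int → List (Int × Int)
  | [], _ => []
  | x :: xs, i =>
    if x = 1 then
      (i, ((runLen xs : Int) + 1)) :: altGo (xs.drop (runLen xs)) (i + (runLen xs : Int) + 1)
    else
      altGo xs (i + 1)
termination_by l _ => l.length
decreasing_by
  all_goals simp [List.length_drop]

def allOne_alt (binary_list : List Int) : List (Int × Int) :=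
  altGo binary_list 0

-- ===== PRECONDITION & SPEC =====
def Spec_allOne (binary_list : List Int) (out : List (Int × Int)) : Prop := out = allOne_alt binary_list
instance (binary_list : List Int) (out : List (Int × Int)) : Decidable (Spec_allOne binary_list out) := by unfold Spec_allOne; infer_instance

-- ===== CLAIM (what is proved, stated in full; the proofs are below) =====
def Claim_equal_allOne : Prop := ∀ (binary_list : List Int), Dom_allOne binary_list → Spec_allOne binary_list (allOne binary_list)

-- ===== LEMMAS AND PROOFS =====

-- B-side continuation while inside a run that started at `left` with `c` ones seen so far
def contRun : List Int → Int → Int → Int → List (Int × Int)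
  | [], left, c, _ => [(left, c)]
  | x :: xs, left, c, i =>
    if x = 1 then contRun xs left (c + 1) (i + 1)
    else (left, c) :: altGo (x :: xs) i

lemma contRun_eq : ∀ (l : List Int) (left c i : Int),
    contRun l left c i = (left, c + (runLen l : Int)) :: altGo (l.drop (runLen l)) (i + (runLen l : Int)) := by
  intro l
  induction l with
  | nil => intro left c i; simp [contRun, runLen, altGo]
  | cons x xs ih =>
    intro left c i
    by_cases hx : x = 1
    · have h1 : runLen (x :: xs) = runLen xs + 1 := by simp [runLen, hx]
      have h0 : contRun (x :: xs) left c i = contRun xs left (c + 1) (i + 1) := by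
        simp [contRun, hx]
      have e1 : c + 1 + ((runLen xs : Nat) : Int) = c + ((runLen xs + 1 : Nat) : Int) := by
        push_cast; ring
      have e2 : i + 1 + ((runLen xs : Nat) : Int) = i + ((runLen xs + 1 : Nat) : Int) := by
        push_cast; ring
      rw [h0, ih, h1, List.drop_succ_cons, e1, e2]
    · simp [contRun, runLen, hx]

lemma mainA : ∀ (l : List Int),
    (∀ (i : Int) (d : PySem.Dict Int Int) (left : Int),
      d.keys.Nodup → (∀ k ∈ d.keys, k < i) →
      ((PySem.List.enumerate l i).foldl stepA (d, left, 0)).1.items = d.items ++ altGo l i)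
    ∧ (∀ (i : Int) (d : PySem.Dict Int Int) (D : List (Int × Int)) (left c : Int),
      d.keys.Nodup → (∀ k ∈ d.keys, k < i) → d.items = D ++ [(left, c)] → 1 ≤ c →
      ((PySem.List.enumerate l i).foldl stepA (d, left, c)).1.items = D ++ contRun l left c i) := by
  intro l
  induction l with
  | nil =>
    constructor
    · intro i d left _ _
      simp [PySem.List.enumerate_nil, altGo]
    · intro i d D left c _ _ hitems _
      simpa [PySem.List.enumerate_nil, contRun] using hitems
  | cons x xs ih =>
    constructor
    · -- length = 0 state
      intro i d left hnd hlt
      rw [PySem.List.enumerate_cons, List.foldl_cons]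
      by_cases hx : x = 1
      · -- start a fresh run at i
        have hci : d.contains i = false := by
          by_contra h
          have hc2 : d.contains i = true := by
            revert h; cases d.contains i <;> simp
          exact lt_irrefl i (hlt i ((PySem.Dict.contains_iff_mem_keys d i).mp hc2))
        have hstep : stepA (d, left, 0) (i, x) =
            (d.insert i 1, i, (d.insert i 1).getD i 0) := by
          simp [stepA, hx]
        rw [hstep]
        have hgetD : (d.insert i 1).getD i 0 = 1 := PySem.Dict.getD_insert_self d i 1 0
        rw [hgetD]
        have hkeys : (d.insert i 1).keys = d.keys ++ [i] :=
          PySem.Dict.keys_insert_of_not_contains d 1 hci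
        have hitems : (d.insert i 1).items = d.items ++ [(i, 1)] :=
          PySem.Dict.items_insert_of_not_contains d 1 hci
        have hnd' : (d.insert i 1).keys.Nodup := by
          rw [hkeys]
          refine List.Nodup.append hnd (by simp) ?_
          intro a ha hb
          simp only [List.mem_singleton] at hb
          subst hb
          exact lt_irrefl _ (hlt _ ha)
        have hlt' : ∀ k ∈ (d.insert i 1).keys, k < i + 1 := by
          intro k hk
          rw [hkeys] at hk
          rcases List.mem_append.mp hk with h | h
          · have := hlt k h; omega
          · simp only [List.mem_singleton] at h; omega
        have := (ih).2 (i + 1) (d.insert i 1) d.items i 1 hnd' hlt' hitems (by omega)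
        have ha : altGo (x :: xs) i =
            (i, (runLen xs : Int) + 1) :: altGo (xs.drop (runLen xs)) (i + (runLen xs : Int) + 1) := by
          simp [altGo, hx]
        have e1 : (1 : Int) + (runLen xs : Int) = (runLen xs : Int) + 1 := by omega
        have e2 : i + 1 + (runLen xs : Int) = i + (runLen xs : Int) + 1 := by omega
        rw [this, contRun_eq, e1, e2, ha]
      · -- skip a non-1
        have hstep : stepA (d, left, 0) (i, x) = (d, left, 0) := by
          simp [stepA, hx]
        rw [hstep]
        have := (ih).1 (i + 1) d left hnd (fun k hk => by have := hlt k hk; omega)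
        rw [this]
        simp [altGo, hx]
    · -- inside a run: state (d, left, c), c ≠ 0, d.items = D ++ [(left, c)]
      intro i d D left c hnd hlt hitems hc
      rw [PySem.List.enumerate_cons, List.foldl_cons]
      have hkeysD : d.keys = D.map (·.1) ++ [left] := by
        simp [PySem.Dict.keys, hitems]
      have hleftmem : left ∈ d.keys := by rw [hkeysD]; simp
      have hleftnotD : ∀ p ∈ D, p.1 ≠ left := by
        intro p hp
        have : d.keys.Nodup := hnd
        rw [hkeysD] at this
        have h2 := (List.nodup_append.mp this).2.2
        intro he
        exact h2 p.1 (List.mem_map.mpr ⟨p, hp, rfl⟩) left (by simp) he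
      by_cases hx : x = 1
      · -- extend the run
        have hgleft : d.getD left 0 = c :=
          PySem.Dict.getD_of_mem_items d (by rw [hitems]; simp) hnd 0
        have hcontl : d.contains left = true :=
          (PySem.Dict.contains_iff_mem_keys d left).mpr hleftmem
        have hc0 : c ≠ 0 := by omega
        have hstep : stepA (d, left, c) (i, x) =
            (d.modify left 0 (· + 1), left, (d.modify left 0 (· + 1)).getD left 0) := by
          simp [stepA, hx, hc0]
        rw [hstep]
        have hg' : (d.modify left 0 (· + 1)).getD left 0 = c + 1 := by
          rw [PySem.Dict.getD_modify_self, hgleft]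
        rw [hg']
        have hitems' : (d.modify left 0 (· + 1)).items = D ++ [(left, c + 1)] := by
          have hmi : (d.modify left 0 (· + 1)) = d.insert left (d.getD left 0 + 1) := rfl
          rw [hmi, hgleft]
          rw [PySem.Dict.items_insert_of_contains d (c + 1) hcontl, hitems]
          rw [List.map_append]
          congr 1
          · calc List.map (fun p => if (p.1 == left) = true then (left, c + 1) else p) D
                = List.map id D := by
                  apply List.map_congr_left
                  intro p hp
                  simp [hleftnotD p hp]
              _ = D := List.map_id D
          · simp
        have hkeys' : (d.modify left 0 (· + 1)).keys = d.keys := by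
          rw [PySem.Dict.keys_modify]
          exact PySem.Dict.keys_insert_of_contains d _ hcontl
        have := (ih).2 (i + 1) (d.modify left 0 (· + 1)) D left (c + 1)
          (by rw [hkeys']; exact hnd)
          (by rw [hkeys']; intro k hk; have := hlt k hk; omega)
          hitems' (by omega)
        rw [this]
        simp [contRun, hx]
      · -- run ends
        have hstep : stepA (d, left, c) (i, x) = (d, left, 0) := by
          simp [stepA, hx]
        rw [hstep]
        have := (ih).1 (i + 1) d left hnd (fun k hk => by have := hlt k hk; omega)
        rw [this, hitems]
        simp [contRun, hx, altGo]

-- ===== VERDICT (by name: the statement is the Claim_ definition above) =====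
theorem allOne_spec : Claim_equal_allOne := by
  intro binary_list _
  unfold Spec_allOne allOne allOne_alt
  have := (mainA binary_list).1 0 PySem.Dict.empty 0 (by simp)
    (by simp)
  rw [this]
  rfl
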